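-- pv_equiv track=rewrite | github.com/cognitedata/cognite-sdk-python | cognite/client/_api/datapoints.py | _find_initial_query_limits
-- ===== SOURCE A (Python) =====
-- def _find_initial_query_limits(limits: list[int], max_limit: int) -> list[int]:
--     actual_lims = [0] * len(limits)
--     not_done = set(range(len(limits)))
--     while not_done:
--         part = max_limit // len(not_done)
--         if not part:
--             # We still might not have not reached max_limit, but we can no longer distribute evenly
--             break
--         rm_idx = set()
--         for i in not_done:
--             i_part = min(part, limits[i])  # A query of limit=10 does not need more of max_limit than 10
--             actual_lims[i] += i_part
--             max_limit -= i_part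
--             if i_part == limits[i]:
--                 rm_idx.add(i)
--             else:
--                 limits[i] -= i_part
--         not_done -= rm_idx
--     return actual_lims
-- ===== SOURCE B (Python) =====
-- def _find_initial_query_limits(limits: list[int], max_limit: int) -> list[int]:
--     # Sort indices by limit; pay out rounds with a moving prefix pointer:
--     # finished queries (limit - given <= part) form a prefix of the sorted order,
--     # so each query is settled exactly once.
--     # Note: does not mutate `limits` in place.
--     n = len(limits)
--     order = sorted(range(n), key=lambda i: limits[i])
--     vals = [limits[i] for i in order]
--     actual = [0] * n
--     given = 0
--     j = 0
--     budget = max_limit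
--     while j < n:
--         part = budget // (n - j)
--         if part == 0:
--             break
--         while j < n and vals[j] - given <= part:
--             actual[order[j]] = vals[j]
--             budget -= vals[j] - given
--             j += 1
--         budget -= part * (n - j)
--         given += part
--     for k in range(j, n):
--         actual[order[k]] = given
--     return actual
-- ===== Notes on version B (the rewrite author's own statement) =====
-- stated objective: alternative
-- what changed: A repeatedly rescans the whole surviving index set each round; B sorts the indices by limit once and settles finished queries with a moving prefix pointer over the sorted order, so each query is examined once per round boundary it survives and settled exactly once. B does not mutate the `limits` argument in place (A does); return values are identical.
import Mathlib
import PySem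

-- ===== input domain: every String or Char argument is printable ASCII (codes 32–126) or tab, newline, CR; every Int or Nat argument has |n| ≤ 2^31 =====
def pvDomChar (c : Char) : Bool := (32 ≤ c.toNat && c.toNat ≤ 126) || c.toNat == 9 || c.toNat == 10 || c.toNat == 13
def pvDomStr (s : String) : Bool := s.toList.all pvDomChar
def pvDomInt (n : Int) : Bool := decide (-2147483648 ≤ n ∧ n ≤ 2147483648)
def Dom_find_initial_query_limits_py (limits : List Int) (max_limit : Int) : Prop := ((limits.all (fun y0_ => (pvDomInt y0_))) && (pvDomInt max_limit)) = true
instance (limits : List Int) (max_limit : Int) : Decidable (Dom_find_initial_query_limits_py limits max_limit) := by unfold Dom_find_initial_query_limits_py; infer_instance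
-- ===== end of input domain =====

-- B replaces A's per-round rescanning of the surviving set with sort-by-limit + a moving
-- settled-prefix pointer (objective: alternative). Equivalence is about the RETURN value only:
-- A mutates its `limits` argument in place, B does not.

-- ===== PORT A =====
-- body of A's `for i in not_done`; state = (limits, actual_lims, max_limit, rm_idx)
def pvRoundA (part : Int) : List Int → List Int × List Int × Int × PySem.Set Int → List Int × List Int × Int × PySem.Set Int
  | [], st => st
  | i :: rest, (lims, act, M, rm) =>
      let li := PySem.List.pyGetD lims i 0          -- limits[i]; i is always a valid index here
      let ipart := min part li
      let act' := act.set i.toNat (PySem.List.pyGetD act i 0 + ipart)  -- actual_lims[i] += i_part (0 ≤ i < len, exact)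
      if ipart = li then
        pvRoundA part rest (lims, act', M - ipart, PySem.Set.add rm i)
      else
        pvRoundA part rest (lims.set i.toNat (li - ipart), act', M - ipart, rm)

-- A's `while not_done` loop; fuel `len(limits) + 2` is provably enough (a round with no
-- removals forces the next `part` to 0), so the 0-fuel branch is never reached.
def pvLoopA : Nat → List Int → List Int → PySem.Set Int → Int → List Int
  | 0, _, act, _, _ => act
  | fuel + 1, lims, act, nd, M =>
      if nd.isEmpty then act
      else
        let part := PySem.Int.floordiv M nd.length
        if part = 0 then act
        else
          match pvRoundA part nd (lims, act, M, PySem.Set.empty) with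
          | (lims', act', M', rm) => pvLoopA fuel lims' act' (PySem.Set.diff nd rm) M'

def find_initial_query_limits_py (limits : List Int) (max_limit : Int) : List Int :=
  pvLoopA (limits.length + 2) limits (List.replicate limits.length 0)
    (PySem.Set.ofList (PySem.List.pyRange 0 limits.length 1)) max_limit

-- ===== PORT B =====
-- B's inner `while j < n and vals[j] - given <= part`: the pointer walk over the sorted
-- order/vals is the structural recursion over their (paired) suffixes.
def pvAdvB (given part : Int) : List Int → List Int → List Int → Int → List Int × List Int × List Int × Int
  | o :: os, v :: vs, actual, budget =>
      if v - given ≤ part then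
        pvAdvB given part os vs (actual.set o.toNat v) (budget - (v - given))  -- actual[order[j]] = vals[j] (0 ≤ o < len, exact)
      else (o :: os, v :: vs, actual, budget)
  | os, vs, actual, budget => (os, vs, actual, budget)

-- B's outer `while j < n` loop; same provably sufficient fuel as A's loop.
def pvLoopB : Nat → List Int → List Int → List Int → Int → Int → List Int × List Int × Int
  | 0, osuf, _, actual, _, given => (actual, osuf, given)
  | fuel + 1, osuf, vsuf, actual, budget, given =>
      if osuf.isEmpty then (actual, osuf, given)
      else
        let part := PySem.Int.floordiv budget osuf.length
        if part = 0 then (actual, osuf, given)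
        else
          match pvAdvB given part osuf vsuf actual budget with
          | (os', vs', actual', budget') =>
              pvLoopB fuel os' vs' actual' (budget' - part * os'.length) (given + part)

def find_initial_query_limits_py_alt (limits : List Int) (max_limit : Int) : List Int :=
  let n := limits.length
  let order := PySem.List.sorted (PySem.List.pyRange 0 n 1) (fun i => PySem.List.pyGetD limits i 0) false
  let vals := order.map (fun i => PySem.List.pyGetD limits i 0)
  match pvLoopB (n + 2) order vals (List.replicate n 0) max_limit 0 with
  | (actual, osuf, given) => osuf.foldl (fun acc o => acc.set o.toNat given) actual  -- final `for k in range(j, n)`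

-- ===== PRECONDITION & SPEC =====
def Spec_find_initial_query_limits_py (limits : List Int) (max_limit : Int) (out : List Int) : Prop := out = find_initial_query_limits_py_alt limits max_limit
instance (limits : List Int) (max_limit : Int) (out : List Int) : Decidable (Spec_find_initial_query_limits_py limits max_limit out) := by unfold Spec_find_initial_query_limits_py; infer_instance

-- ===== CLAIM (what is proved, stated in full; the proofs are below) =====
def Claim_equal_find_initial_query_limits_py : Prop := ∀ (limits : List Int) (max_limit : Int), Dom_find_initial_query_limits_py limits max_limit → Spec_find_initial_query_limits_py limits max_limit (find_initial_query_limits_py limits max_limit)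

-- ===== LEMMAS AND PROOFS =====

-- The bisimulation invariant tying A's loop state (lims, act, nd, M) to B's (osuf, vsuf, actual, budget, given).
def pvInv (limits0 lims act : List Int) (nd : List Int) (M : Int)
    (osuf vsuf actual : List Int) (budget given : Int) : Prop :=
  lims.length = limits0.length ∧ act.length = limits0.length ∧ actual.length = limits0.length ∧
  M = budget ∧
  nd.Nodup ∧ (∀ i ∈ nd, 0 ≤ i ∧ i < (limits0.length : Int)) ∧
  nd.Perm osuf ∧
  vsuf = osuf.map (fun o => PySem.List.pyGetD limits0 o 0) ∧
  vsuf.Pairwise (· ≤ ·) ∧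
  (∀ i ∈ nd, PySem.List.pyGetD lims i 0 = PySem.List.pyGetD limits0 i 0 - given) ∧
  (∀ t : Nat, t < limits0.length →
      act.getD t 0 = if (↑t : Int) ∈ nd then given else PySem.List.pyGetD limits0 (↑t) 0) ∧
  (∀ t : Nat, t < limits0.length →
      actual.getD t 0 = if (↑t : Int) ∈ nd then 0 else PySem.List.pyGetD limits0 (↑t) 0)


-- getD after set, in-range
theorem pvGetD_set (l : List Int) (k : Nat) (v : Int) (t : Nat) (hk : k < l.length) :
    (l.set k v).getD t 0 = if t = k then v else l.getD t 0 := by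
  by_cases h : t = k
  · subst h; simp [List.getD_eq_getElem?_getD, hk]
  · simp [List.getD_eq_getElem?_getD, h, Ne.symm h]

-- Python indexing at a nonnegative Int index is Nat getD
theorem pvPyGetD_toNat (xs : List Int) (i : Int) (h0 : 0 ≤ i) :
    PySem.List.pyGetD xs i 0 = xs.getD i.toNat 0 := by
  rw [show PySem.List.pyGetD xs i 0 = PySem.List.pyGetD xs ((i.toNat : Nat) : Int) 0 by
        rw [Int.toNat_of_nonneg h0],
      PySem.List.pyGetD_natCast]

-- pyGetD after set: same / other nonnegative index
theorem pvPyGetD_set_self (l : List Int) (i : Int) (v : Int) (h0 : 0 ≤ i) (hi : i < (l.length : Int)) :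
    PySem.List.pyGetD (l.set i.toNat v) i 0 = v := by
  rw [pvPyGetD_toNat _ _ h0, pvGetD_set l i.toNat v i.toNat (by omega)]
  simp

theorem pvPyGetD_set_ne (l : List Int) (i : Int) (v : Int) (j : Int) (h0 : 0 ≤ j) (hi0 : 0 ≤ i)
    (hne : j ≠ i) : PySem.List.pyGetD (l.set i.toNat v) j 0 = PySem.List.pyGetD l j 0 := by
  by_cases hil : i.toNat < l.length
  · rw [pvPyGetD_toNat _ _ h0, pvPyGetD_toNat _ _ h0, pvGetD_set l i.toNat v j.toNat hil,
      if_neg (by omega)]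
  · rw [List.set_eq_of_length_le (by omega)]

-- characterization of the final settle-the-survivors fold (B's trailing for-loop)
theorem pvFoldSet_spec (g : Int) : ∀ (os : List Int) (acc : List Int),
    (∀ o ∈ os, 0 ≤ o ∧ o < (acc.length : Int)) →
    (os.foldl (fun a o => a.set o.toNat g) acc).length = acc.length ∧
    ∀ t : Nat, t < acc.length →
      (os.foldl (fun a o => a.set o.toNat g) acc).getD t 0 =
        if (↑t : Int) ∈ os then g else acc.getD t 0 := by
  intro os
  induction os with
  | nil => intro acc _; simp
  | cons o os ih =>
    intro acc hb
    have ho := hb o (by simp)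
    have hkn : o.toNat < acc.length := by omega
    have hlen : (acc.set o.toNat g).length = acc.length := by simp
    obtain ⟨ihlen, ihpt⟩ := ih (acc.set o.toNat g)
      (by intro x hx; have := hb x (by simp [hx]); omega)
    refine ⟨by simpa [hlen] using ihlen, ?_⟩
    intro t ht
    rw [List.foldl_cons, ihpt t (by omega)]
    rw [pvGetD_set acc o.toNat g t hkn]
    have hto : ((↑t : Int) = o) ↔ (t = o.toNat) := by omega
    simp only [List.mem_cons]
    by_cases hmem : (↑t : Int) ∈ os
    · rw [if_pos hmem, if_pos (Or.inr hmem)]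
    · rw [if_neg hmem]
      by_cases heq : t = o.toNat
      · rw [if_pos heq, if_pos (Or.inl (hto.mpr heq))]
      · rw [if_neg heq, if_neg ?_]
        rintro (h | h)
        · exact heq (hto.mp h)
        · exact hmem h

-- characterization of one pass of A's inner `for i in not_done` fold
theorem pvRoundA_spec (part : Int) : ∀ (nd lims act : List Int) (M : Int) (rm₀ : PySem.Set Int),
    nd.Nodup → (∀ i ∈ nd, 0 ≤ i ∧ i < (lims.length : Int)) → act.length = lims.length →
    (∀ i ∈ nd, i ∉ rm₀) →
    ∃ lims' act' M',
      pvRoundA part nd (lims, act, M, rm₀) =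
        (lims', act', M', rm₀ ++ nd.filter (fun i => decide (PySem.List.pyGetD lims i 0 ≤ part))) ∧
      lims'.length = lims.length ∧ act'.length = act.length ∧
      M' = M - (nd.map (fun i => min part (PySem.List.pyGetD lims i 0))).sum ∧
      (∀ t : Nat, t < act.length →
        act'.getD t 0 = if (↑t : Int) ∈ nd then act.getD t 0 + min part (PySem.List.pyGetD lims (↑t) 0) else act.getD t 0) ∧
      (∀ i, i ∈ nd → ¬ PySem.List.pyGetD lims i 0 ≤ part →
        PySem.List.pyGetD lims' i 0 = PySem.List.pyGetD lims i 0 - part) ∧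
      (∀ i₀ : Int, 0 ≤ i₀ → i₀ ∉ nd → PySem.List.pyGetD lims' i₀ 0 = PySem.List.pyGetD lims i₀ 0) := by
  intro nd
  induction nd with
  | nil =>
    intro lims act M rm₀ _ _ _ _
    exact ⟨lims, act, M, by simp [pvRoundA], rfl, rfl, by simp, by intro t ht; simp, by simp,
      fun _ _ _ => rfl⟩
  | cons i rest ih =>
    intro lims act M rm₀ hnd hb hact hrm
    have hi := hb i (by simp)
    have hirest : i ∉ rest := (List.nodup_cons.mp hnd).1
    have hknl : i.toNat < lims.length := by omega
    have hkna : i.toNat < act.length := by omega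
    have hpga : PySem.List.pyGetD act i 0 = act.getD i.toNat 0 := pvPyGetD_toNat act i hi.1
    by_cases hcase : min part (PySem.List.pyGetD lims i 0) = PySem.List.pyGetD lims i 0
    · -- i is finished this round (limits[i] ≤ part)
      have hcond : PySem.List.pyGetD lims i 0 ≤ part := inf_eq_right.mp hcase
      have hadd : PySem.Set.add rm₀ i = rm₀ ++ [i] := by
        have hnm : i ∉ rm₀ := hrm i List.mem_cons_self
        simp only [PySem.Set.add]
        rw [if_neg (by simpa using hnm)]
      obtain ⟨lims', act', M', heq, hl1, hl2, hM, hactpt, hlimpt, hout⟩ :=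
        ih lims (act.set i.toNat (PySem.List.pyGetD act i 0 + min part (PySem.List.pyGetD lims i 0)))
          (M - min part (PySem.List.pyGetD lims i 0)) (rm₀ ++ [i])
          (List.nodup_cons.mp hnd).2
          (by intro x hx; exact hb x (by simp [hx]))
          (by simpa using hact)
          (by
            intro j hj
            simp only [List.mem_append, List.mem_singleton]
            rintro (h | h)
            · exact hrm j (by simp [hj]) h
            · subst h; exact hirest hj)
      refine ⟨lims', act', M', ?_, hl1, by simpa using hl2, ?_, ?_, ?_, ?_⟩
      · show pvRoundA part (i :: rest) (lims, act, M, rm₀) = _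
        rw [pvRoundA]
        simp only [if_pos hcase, hadd, heq]
        rw [List.filter_cons, if_pos (by simpa using hcond)]
        simp [List.append_assoc]
      · rw [hM]; simp only [List.map_cons, List.sum_cons]; ring
      · intro t ht
        have htl : t < (act.set i.toNat (PySem.List.pyGetD act i 0 + min part (PySem.List.pyGetD lims i 0))).length := by
          simpa using ht
        rw [hactpt t htl, pvGetD_set act i.toNat _ t hkna]
        have hto : ((↑t : Int) = i) ↔ (t = i.toNat) := by omega
        simp only [List.mem_cons]
        by_cases hmem : (↑t : Int) ∈ rest
        · have hne : ¬ t = i.toNat := by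
            intro h; exact hirest (by rwa [hto.mpr h] at hmem)
          rw [if_pos hmem, if_neg hne, if_pos (Or.inr hmem)]
        · rw [if_neg hmem]
          by_cases heq2 : t = i.toNat
          · rw [if_pos heq2, if_pos (Or.inl (hto.mpr heq2)), hpga]
            rw [hto.mpr heq2, heq2]
          · rw [if_neg heq2, if_neg ?_]
            rintro (h | h)
            · exact heq2 (hto.mp h)
            · exact hmem h
      · intro j hj hcj
        rcases List.mem_cons.mp hj with h | h
        · subst h; exact absurd hcond hcj
        · exact hlimpt j h hcj
      · intro i₀ h0 hni
        exact hout i₀ h0 (fun h => hni (by simp [h]))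
    · -- i survives this round (part < limits[i]); limits[i] -= part
      have hlt : ¬ PySem.List.pyGetD lims i 0 ≤ part := by
        intro h; exact hcase (inf_eq_right.mpr h)
      have hmin : min part (PySem.List.pyGetD lims i 0) = part := inf_eq_left.mpr (by omega)
      have hset : ∀ j : Int, 0 ≤ j → j ≠ i →
          PySem.List.pyGetD (lims.set i.toNat (PySem.List.pyGetD lims i 0 - min part (PySem.List.pyGetD lims i 0))) j 0 = PySem.List.pyGetD lims j 0 := by
        intro j hj0 hjne
        exact pvPyGetD_set_ne lims i _ j hj0 hi.1 hjne
      obtain ⟨lims', act', M', heq, hl1, hl2, hM, hactpt, hlimpt, hout⟩ :=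
        ih (lims.set i.toNat (PySem.List.pyGetD lims i 0 - min part (PySem.List.pyGetD lims i 0)))
          (act.set i.toNat (PySem.List.pyGetD act i 0 + min part (PySem.List.pyGetD lims i 0)))
          (M - min part (PySem.List.pyGetD lims i 0)) rm₀
          (List.nodup_cons.mp hnd).2
          (by intro x hx; have := hb x (by simp [hx]); simpa using this)
          (by simp [hact])
          (by intro j hj; exact hrm j (by simp [hj]))
      have hne_of_mem : ∀ j ∈ rest, j ≠ i := by
        intro j hj h; subst h; exact hirest hj
      refine ⟨lims', act', M', ?_, by simpa using hl1, by simpa using hl2, ?_, ?_, ?_, ?_⟩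
      · show pvRoundA part (i :: rest) (lims, act, M, rm₀) = _
        rw [pvRoundA]
        simp only [if_neg hcase, heq]
        have hfc := List.filter_congr (l := rest)
          (p := fun j => decide (PySem.List.pyGetD (lims.set i.toNat (PySem.List.pyGetD lims i 0 - min part (PySem.List.pyGetD lims i 0))) j 0 ≤ part))
          (q := fun j => decide (PySem.List.pyGetD lims j 0 ≤ part))
          (by intro j hj; simp only [hset j (hb j (by simp [hj])).1 (hne_of_mem j hj)])
        rw [hfc, List.filter_cons, if_neg (by simpa using hlt)]
      · rw [hM]
        have hmc := List.map_congr_left (l := rest)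
          (f := fun j => min part (PySem.List.pyGetD (lims.set i.toNat (PySem.List.pyGetD lims i 0 - min part (PySem.List.pyGetD lims i 0))) j 0))
          (g := fun j => min part (PySem.List.pyGetD lims j 0))
          (by intro j hj; simp only [hset j (hb j (by simp [hj])).1 (hne_of_mem j hj)])
        rw [hmc]
        simp only [List.map_cons, List.sum_cons]; ring
      · intro t ht
        have htl : t < (act.set i.toNat (PySem.List.pyGetD act i 0 + min part (PySem.List.pyGetD lims i 0))).length := by
          simpa using ht
        rw [hactpt t htl, pvGetD_set act i.toNat _ t hkna]
        have hto : ((↑t : Int) = i) ↔ (t = i.toNat) := by omega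
        simp only [List.mem_cons]
        by_cases hmem : (↑t : Int) ∈ rest
        · have hne : ¬ t = i.toNat := by
            intro h; exact hirest (by rwa [hto.mpr h] at hmem)
          rw [if_pos hmem, if_neg hne, if_pos (Or.inr hmem),
            hset (↑t) (by omega) (fun h => hne (hto.mp h))]
        · rw [if_neg hmem]
          by_cases heq2 : t = i.toNat
          · rw [if_pos heq2, if_pos (Or.inl (hto.mpr heq2)), hpga]
            rw [hto.mpr heq2, heq2]
          · rw [if_neg heq2, if_neg ?_]
            rintro (h | h)
            · exact heq2 (hto.mp h)
            · exact hmem h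
      · intro j hj hcj
        rcases List.mem_cons.mp hj with h | h
        · subst h
          rw [hout j hi.1 hirest, pvPyGetD_set_self lims j _ hi.1 (by omega), hmin]
        · rw [hlimpt j h (by rwa [hset j (hb j (by simp [h])).1 (hne_of_mem j h)]),
            hset j (hb j (by simp [h])).1 (hne_of_mem j h)]
      · intro i₀ h0 hni
        rw [hout i₀ h0 (fun h => hni (by simp [h])),
          hset i₀ h0 (fun h => hni (by simp [h]))]

-- characterization of B's pointer walk (takeWhile / dropWhile on the sorted suffix)
theorem pvAdvB_spec (given part : Int) (f : Int → Int) : ∀ (osuf actual : List Int) (budget : Int),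
    (∀ o ∈ osuf, 0 ≤ o ∧ o < (actual.length : Int)) →
    ∃ actual',
      pvAdvB given part osuf (osuf.map f) actual budget =
        (osuf.dropWhile (fun o => decide (f o - given ≤ part)),
         (osuf.dropWhile (fun o => decide (f o - given ≤ part))).map f,
         actual',
         budget - ((osuf.takeWhile (fun o => decide (f o - given ≤ part))).map (fun o => f o - given)).sum) ∧
      actual'.length = actual.length ∧
      (∀ t : Nat, t < actual.length →
        actual'.getD t 0 = if (↑t : Int) ∈ osuf.takeWhile (fun o => decide (f o - given ≤ part)) then f (↑t) else actual.getD t 0) := by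
  intro osuf
  induction osuf with
  | nil =>
    intro actual budget _
    exact ⟨actual, by simp [pvAdvB], rfl, by intro t ht; simp⟩
  | cons o os ih =>
    intro actual budget hb
    have ho := hb o (by simp)
    have hkn : o.toNat < actual.length := by omega
    by_cases hc : f o - given ≤ part
    · have hc' : f o ≤ part + given := by omega
      obtain ⟨a', heq, hlen, hpt⟩ := ih (actual.set o.toNat (f o)) (budget - (f o - given))
        (by intro x hx; have := hb x (by simp [hx]); simpa using this)
      refine ⟨a', ?_, ?_, ?_⟩
      · show pvAdvB given part (o :: os) (f o :: os.map f) actual budget = _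
        rw [pvAdvB, if_pos hc, heq]
        have htw : (o :: os).takeWhile (fun o => decide (f o - given ≤ part)) =
            o :: os.takeWhile (fun o => decide (f o - given ≤ part)) := by
          simp [hc']
        have hdw : (o :: os).dropWhile (fun o => decide (f o - given ≤ part)) =
            os.dropWhile (fun o => decide (f o - given ≤ part)) := by
          simp [hc']
        rw [htw, hdw]
        congr 3
        simp only [List.map_cons, List.sum_cons]
        ring
      · simpa using hlen
      · intro t ht
        have htw : (o :: os).takeWhile (fun o => decide (f o - given ≤ part)) =
            o :: os.takeWhile (fun o => decide (f o - given ≤ part)) := by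
          simp [hc']
        rw [htw, hpt t (by simpa using ht), pvGetD_set actual o.toNat (f o) t hkn]
        have hto : ((↑t : Int) = o) ↔ (t = o.toNat) := by omega
        simp only [List.mem_cons]
        by_cases hmem : (↑t : Int) ∈ os.takeWhile (fun o => decide (f o - given ≤ part))
        · rw [if_pos hmem, if_pos (Or.inr hmem)]
        · rw [if_neg hmem]
          by_cases heq2 : t = o.toNat
          · rw [if_pos heq2, if_pos (Or.inl (hto.mpr heq2))]
            rw [hto.mpr heq2]
          · rw [if_neg heq2, if_neg ?_]
            rintro (h | h)
            · exact heq2 (hto.mp h)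
            · exact hmem h
    · have hc' : ¬ f o ≤ part + given := by omega
      refine ⟨actual, ?_, rfl, ?_⟩
      · show pvAdvB given part (o :: os) (f o :: os.map f) actual budget = _
        rw [pvAdvB, if_neg hc]
        have htw : (o :: os).takeWhile (fun o => decide (f o - given ≤ part)) = [] := by
          simp [hc']
        have hdw : (o :: os).dropWhile (fun o => decide (f o - given ≤ part)) = o :: os := by
          simp [hc']
        rw [htw, hdw]
        simp
      · intro t ht
        have htw : (o :: os).takeWhile (fun o => decide (f o - given ≤ part)) = [] := by
          simp [hc']
        rw [htw]
        simp

-- on a key-sorted list, the pointer walk's dropWhile is exactly the filter of the survivors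
theorem pvSorted_dropWhile_filter (f : Int → Int) (thr : Int) (os : List Int)
    (hs : (os.map f).Pairwise (· ≤ ·)) :
    os.dropWhile (fun o => decide (f o ≤ thr)) = os.filter (fun o => decide (¬ f o ≤ thr)) ∧
    os.takeWhile (fun o => decide (f o ≤ thr)) = os.filter (fun o => decide (f o ≤ thr)) := by
  rw [List.pairwise_map] at hs
  induction os with
  | nil => simp
  | cons o os ih =>
    obtain ⟨hhead, htail⟩ := List.pairwise_cons.mp hs
    by_cases hc : f o ≤ thr
    · obtain ⟨ih1, ih2⟩ := ih htail
      simp [hc, ih1, ih2]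
    · have hall : ∀ b ∈ os, ¬ f b ≤ thr := by
        intro b hb hle
        exact hc (le_trans (hhead b hb) hle)
      have hc' : thr < f o := not_le.mp hc
      have h1 : os.filter (fun o => decide (thr < f o)) = os := by
        rw [List.filter_eq_self]; intro a ha
        simpa using not_le.mp (hall a ha)
      have h2 : os.filter (fun o => decide (f o ≤ thr)) = [] := by
        rw [List.filter_eq_nil_iff]; intro a ha; simpa using hall a ha
      constructor
      · simp [hc, hc', h1]
      · simp [hc, h2]

-- a round with no removals drives the next `part` to 0 (both loops then exit)
theorem pvPartZero (M : Int) (L : Nat) (hL : 0 < L) :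
    PySem.Int.floordiv (M - PySem.Int.floordiv M L * L) L = 0 := by
  have hL' : (0 : Int) < (L : Int) := by exact_mod_cast hL
  have h1 := PySem.Int.floordiv_mul_add_mod M (L : Int)
  have h2 : M - PySem.Int.floordiv M (L : Int) * (L : Int) = PySem.Int.mod M (L : Int) := by linarith
  rw [h2, PySem.Int.floordiv_eq_iff_of_pos hL']
  refine ⟨by simpa using PySem.Int.mod_nonneg M hL', by simpa using PySem.Int.mod_lt M hL'⟩

-- loop-exit equality: under the invariant, A's answer equals B's settled array
theorem pvExit (limits0 lims act nd : List Int) (M : Int) (osuf vsuf actual : List Int) (budget given : Int)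
    (h : pvInv limits0 lims act nd M osuf vsuf actual budget given) :
    act = osuf.foldl (fun acc o => acc.set o.toNat given) actual := by
  obtain ⟨h1, h2, h3, h4, h5, h6, h7, h8, h9, h10, h11, h12⟩ := h
  have hbos : ∀ o ∈ osuf, 0 ≤ o ∧ o < (actual.length : Int) := by
    intro o hoo
    have := h6 o (h7.mem_iff.mpr hoo)
    omega
  obtain ⟨hfl, hfp⟩ := pvFoldSet_spec given osuf actual hbos
  apply List.ext_getElem (by omega)
  intro t ht1 ht2
  have htn : t < limits0.length := by omega
  have hg1 : act[t] = act.getD t 0 := (List.getD_eq_getElem act 0 ht1).symm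
  have hg2 : (osuf.foldl (fun acc o => acc.set o.toNat given) actual)[t] =
      (osuf.foldl (fun acc o => acc.set o.toNat given) actual).getD t 0 :=
    (List.getD_eq_getElem _ 0 ht2).symm
  rw [hg1, hg2, h11 t htn, hfp t (by omega)]
  by_cases hm : (↑t : Int) ∈ nd
  · rw [if_pos hm, if_pos (h7.mem_iff.mp hm)]
  · rw [if_neg hm, if_neg (fun hh => hm (h7.mem_iff.mpr hh)), h12 t htn, if_neg hm]

-- one synchronized round preserves the invariant
theorem pvStep (limits0 lims act nd : List Int) (M : Int) (osuf vsuf actual : List Int) (budget given : Int)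
    (h : pvInv limits0 lims act nd M osuf vsuf actual budget given) (_hne : nd ≠ [])
    (part : Int) (hpart : part = PySem.Int.floordiv M nd.length) :
    ∃ lims' act' M' rm os' vs' actual' budget',
      pvRoundA part nd (lims, act, M, PySem.Set.empty) = (lims', act', M', rm) ∧
      pvAdvB given part osuf vsuf actual budget = (os', vs', actual', budget') ∧
      pvInv limits0 lims' act' (PySem.Set.diff nd rm) M' os' vs' actual' (budget' - part * os'.length) (given + part) ∧
      M' = budget' - part * os'.length ∧
      (rm = [] → PySem.Set.diff nd rm = nd ∧ os' = osuf ∧ M' = M - part * nd.length) ∧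
      (rm ≠ [] → (PySem.Set.diff nd rm).length < nd.length) := by
  obtain ⟨h1, h2, h3, h4, h5, h6, h7, h8, h9, h10, h11, h12⟩ := h
  -- A's inner fold
  obtain ⟨lims', act', M', hAeq, hAl1, hAl2, hAM, hAact, hAlim, hAout⟩ :=
    pvRoundA_spec part nd lims act M PySem.Set.empty h5
      (by intro i hi; have := h6 i hi; omega)
      (by omega) (by intro i _ hi; simp [PySem.Set.empty] at hi)
  -- the removal condition, expressed over the original limits
  have hrmC : nd.filter (fun i => decide (PySem.List.pyGetD lims i 0 ≤ part)) =
      nd.filter (fun i => decide (PySem.List.pyGetD limits0 i 0 - given ≤ part)) := by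
    apply List.filter_congr
    intro j hj
    simp only [h10 j hj]
  -- B's pointer walk
  obtain ⟨actual', hBeq, hBl, hBact⟩ :=
    pvAdvB_spec given part (fun o => PySem.List.pyGetD limits0 o 0) osuf actual budget
      (by intro o hoo; have := h6 o (h7.mem_iff.mpr hoo); omega)
  have hpair : (osuf.map (fun o => PySem.List.pyGetD limits0 o 0 - given)).Pairwise (· ≤ ·) := by
    rw [List.pairwise_map]
    have := List.pairwise_map.mp (h8 ▸ h9)
    exact this.imp (by intro a b hab; omega)
  have hsplit := pvSorted_dropWhile_filter (fun o => PySem.List.pyGetD limits0 o 0 - given) part osuf hpair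
  have hdw : osuf.dropWhile (fun o => decide (PySem.List.pyGetD limits0 o 0 - given ≤ part)) =
      osuf.filter (fun o => decide (¬ PySem.List.pyGetD limits0 o 0 - given ≤ part)) := hsplit.1
  have htw : osuf.takeWhile (fun o => decide (PySem.List.pyGetD limits0 o 0 - given ≤ part)) =
      osuf.filter (fun o => decide (PySem.List.pyGetD limits0 o 0 - given ≤ part)) := hsplit.2
  refine ⟨lims', act', M',
    nd.filter (fun i => decide (PySem.List.pyGetD limits0 i 0 - given ≤ part)),
    osuf.dropWhile (fun o => decide (PySem.List.pyGetD limits0 o 0 - given ≤ part)),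
    (osuf.dropWhile (fun o => decide (PySem.List.pyGetD limits0 o 0 - given ≤ part))).map (fun o => PySem.List.pyGetD limits0 o 0),
    actual',
    budget - ((osuf.takeWhile (fun o => decide (PySem.List.pyGetD limits0 o 0 - given ≤ part))).map (fun o => PySem.List.pyGetD limits0 o 0 - given)).sum,
    ?_, ?_, ?_, ?_, ?_, ?_⟩
  · rw [hAeq]
    simp only [PySem.Set.empty, List.nil_append, hrmC]
  · rw [h8]; exact hBeq
  · -- the invariant is preserved
    have hndmem : ∀ {j : Int}, j ∈ PySem.Set.diff nd (nd.filter (fun i => decide (PySem.List.pyGetD limits0 i 0 - given ≤ part))) ↔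
        j ∈ nd ∧ ¬ PySem.List.pyGetD limits0 j 0 - given ≤ part := by
      intro j
      show j ∈ nd.filter _ ↔ _
      simp only [List.mem_filter, PySem.Set.contains, List.contains_eq_mem,
        Bool.not_eq_eq_eq_not, Bool.not_true, decide_eq_false_iff_not, decide_eq_true_eq]
      tauto
    refine ⟨hAl1.trans h1, hAl2.trans h2, hBl.trans h3, ?_, ?_, ?_, ?_, rfl, ?_, ?_, ?_, ?_⟩
    · -- M' = (budget' - part*|os'|) : proved as the next top-level goal too; do the sum computation
      rw [hAM]
      have hgc : nd.map (fun i => min part (PySem.List.pyGetD lims i 0)) =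
          nd.map (fun i => min part (PySem.List.pyGetD limits0 i 0 - given)) := by
        apply List.map_congr_left
        intro j hj
        simp only [h10 j hj]
      rw [hgc]
      have hps : (nd.map (fun i => min part (PySem.List.pyGetD limits0 i 0 - given))).sum =
          (osuf.map (fun i => min part (PySem.List.pyGetD limits0 i 0 - given))).sum :=
        (h7.map _).sum_eq
      rw [hps]
      nth_rewrite 1 [← List.takeWhile_append_dropWhile
        (p := fun o => decide (PySem.List.pyGetD limits0 o 0 - given ≤ part)) (l := osuf)]
      rw [List.map_append, List.sum_append]
      have hta : (osuf.takeWhile (fun o => decide (PySem.List.pyGetD limits0 o 0 - given ≤ part))).map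
            (fun i => min part (PySem.List.pyGetD limits0 i 0 - given)) =
          (osuf.takeWhile (fun o => decide (PySem.List.pyGetD limits0 o 0 - given ≤ part))).map
            (fun o => PySem.List.pyGetD limits0 o 0 - given) := by
        apply List.map_congr_left
        intro j hj
        have := List.mem_takeWhile_imp hj
        simp only [decide_eq_true_eq] at this
        omega
      have hda : (osuf.dropWhile (fun o => decide (PySem.List.pyGetD limits0 o 0 - given ≤ part))).map
            (fun i => min part (PySem.List.pyGetD limits0 i 0 - given)) =
          (osuf.dropWhile (fun o => decide (PySem.List.pyGetD limits0 o 0 - given ≤ part))).map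
            (fun _ => part) := by
        apply List.map_congr_left
        intro j hj
        rw [hdw, List.mem_filter] at hj
        have := hj.2
        simp only [decide_eq_true_eq] at this
        omega
      rw [hta, hda, PySem.List.sum_map_const_int, h4]
      ring
    · exact List.Nodup.filter _ h5
    · intro i hi
      exact h6 i (List.mem_filter.mp hi).1
    · rw [hdw]
      have hnd1 : (PySem.Set.diff nd (nd.filter (fun i => decide (PySem.List.pyGetD limits0 i 0 - given ≤ part)))).Nodup :=
        List.Nodup.filter _ h5
      have hnd2 : (osuf.filter (fun o => decide (¬ PySem.List.pyGetD limits0 o 0 - given ≤ part))).Nodup :=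
        (h7.nodup_iff.mp h5).filter _
      rw [List.perm_ext_iff_of_nodup hnd1 hnd2]
      intro a
      rw [hndmem, List.mem_filter]
      simp only [decide_eq_true_eq]
      rw [← h7.mem_iff]
    · -- sortedness of the remaining vals
      have hsub : ((osuf.dropWhile (fun o => decide (PySem.List.pyGetD limits0 o 0 - given ≤ part))).map
            (fun o => PySem.List.pyGetD limits0 o 0)).Sublist (osuf.map (fun o => PySem.List.pyGetD limits0 o 0)) :=
        (List.dropWhile_sublist _).map _
      exact List.Pairwise.sublist hsub (h8 ▸ h9)
    · intro i hi
      have hi' := hndmem.mp hi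
      rw [hAlim i hi'.1 (by rw [h10 i hi'.1]; exact hi'.2), h10 i hi'.1]
      ring
    · intro t ht
      rw [hAact t (by omega)]
      by_cases hm : (↑t : Int) ∈ nd
      · rw [if_pos hm, h10 (↑t) hm, h11 t ht, if_pos hm]
        by_cases hC : PySem.List.pyGetD limits0 (↑t) 0 - given ≤ part
        · rw [if_neg (fun h => (hndmem.mp h).2 hC), min_eq_right (by omega)]
          ring
        · rw [if_pos (hndmem.mpr ⟨hm, hC⟩), min_eq_left (by omega)]
      · rw [if_neg hm, h11 t ht, if_neg hm,
          if_neg (fun h => hm (hndmem.mp h).1)]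
    · intro t ht
      rw [hBact t (by omega), htw]
      by_cases hfin : (↑t : Int) ∈ osuf.filter (fun o => decide (PySem.List.pyGetD limits0 o 0 - given ≤ part))
      · obtain ⟨hmem, hC⟩ := List.mem_filter.mp hfin
        simp only [decide_eq_true_eq] at hC
        rw [if_pos hfin,
          if_neg (fun h => (hndmem.mp h).2 hC)]
      · rw [if_neg hfin, h12 t ht]
        by_cases hm : (↑t : Int) ∈ nd
        · have hC : ¬ PySem.List.pyGetD limits0 (↑t) 0 - given ≤ part := by
            intro hC
            exact hfin (List.mem_filter.mpr ⟨h7.mem_iff.mp hm, by simpa using hC⟩)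
          rw [if_pos hm, if_pos (hndmem.mpr ⟨hm, hC⟩)]
        · rw [if_neg hm, if_neg (fun h => hm (hndmem.mp h).1)]
  · -- M' equals B's next budget (same computation as in the invariant)
    rw [hAM]
    have hgc : nd.map (fun i => min part (PySem.List.pyGetD lims i 0)) =
        nd.map (fun i => min part (PySem.List.pyGetD limits0 i 0 - given)) := by
      apply List.map_congr_left
      intro j hj
      simp only [h10 j hj]
    rw [hgc]
    have hps : (nd.map (fun i => min part (PySem.List.pyGetD limits0 i 0 - given))).sum =
        (osuf.map (fun i => min part (PySem.List.pyGetD limits0 i 0 - given))).sum :=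
      (h7.map _).sum_eq
    rw [hps]
    nth_rewrite 1 [← List.takeWhile_append_dropWhile
      (p := fun o => decide (PySem.List.pyGetD limits0 o 0 - given ≤ part)) (l := osuf)]
    rw [List.map_append, List.sum_append]
    have hta : (osuf.takeWhile (fun o => decide (PySem.List.pyGetD limits0 o 0 - given ≤ part))).map
          (fun i => min part (PySem.List.pyGetD limits0 i 0 - given)) =
        (osuf.takeWhile (fun o => decide (PySem.List.pyGetD limits0 o 0 - given ≤ part))).map
          (fun o => PySem.List.pyGetD limits0 o 0 - given) := by
      apply List.map_congr_left
      intro j hj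
      have := List.mem_takeWhile_imp hj
      simp only [decide_eq_true_eq] at this
      omega
    have hda : (osuf.dropWhile (fun o => decide (PySem.List.pyGetD limits0 o 0 - given ≤ part))).map
          (fun i => min part (PySem.List.pyGetD limits0 i 0 - given)) =
        (osuf.dropWhile (fun o => decide (PySem.List.pyGetD limits0 o 0 - given ≤ part))).map
          (fun _ => part) := by
      apply List.map_congr_left
      intro j hj
      rw [hdw, List.mem_filter] at hj
      have := hj.2
      simp only [decide_eq_true_eq] at this
      omega
    rw [hta, hda, PySem.List.sum_map_const_int, h4]
    ring
  · -- rm = [] : nothing was removed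
    intro hrme
    have hallC : ∀ i ∈ nd, ¬ PySem.List.pyGetD limits0 i 0 - given ≤ part := by
      intro i hi
      have := List.filter_eq_nil_iff.mp hrme i hi
      simpa using this
    have hfo : osuf.filter (fun o => decide (PySem.List.pyGetD limits0 o 0 - given ≤ part)) = [] := by
      have hperm := h7.filter (fun o => decide (PySem.List.pyGetD limits0 o 0 - given ≤ part))
      rw [hrme] at hperm
      exact (hperm.symm.eq_nil)
    have htwnil : osuf.takeWhile (fun o => decide (PySem.List.pyGetD limits0 o 0 - given ≤ part)) = [] := by
      rw [htw, hfo]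
    refine ⟨?_, ?_, ?_⟩
    · rw [hrme]
      show nd.filter _ = nd
      rw [List.filter_eq_self]
      intro a _
      simp [PySem.Set.contains]
    · conv_rhs => rw [← List.takeWhile_append_dropWhile
        (p := fun o => decide (PySem.List.pyGetD limits0 o 0 - given ≤ part)) (l := osuf)]
      rw [htwnil, List.nil_append]
    · rw [hAM]
      have hgc : nd.map (fun i => min part (PySem.List.pyGetD lims i 0)) =
          nd.map (fun _ => part) := by
        apply List.map_congr_left
        intro j hj
        rw [h10 j hj]
        have := hallC j hj
        omega
      rw [hgc, PySem.List.sum_map_const_int]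
      ring
  · -- rm ≠ [] : the active set shrinks
    intro hrmne
    show (nd.filter _).length < nd.length
    rw [List.length_filter_lt_length_iff_exists]
    obtain ⟨x, hx⟩ := List.exists_mem_of_ne_nil _ hrmne
    obtain ⟨hxm, hxc⟩ := List.mem_filter.mp hx
    simp only [decide_eq_true_eq] at hxc
    refine ⟨x, hxm, ?_⟩
    simp [PySem.Set.contains, List.contains_eq_mem]
    exact ⟨hxm, by omega⟩

-- the synchronized loops agree, given enough fuel
theorem pvMain (limits0 : List Int) : ∀ (fuel : Nat) (lims act nd : List Int) (M : Int)
    (osuf vsuf actual : List Int) (budget given : Int),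
    pvInv limits0 lims act nd M osuf vsuf actual budget given →
    nd.length + 2 ≤ fuel →
    pvLoopA fuel lims act nd M =
      (match pvLoopB fuel osuf vsuf actual budget given with
       | (a, os, g) => os.foldl (fun acc o => acc.set o.toNat g) a) := by
  intro fuel
  induction fuel with
  | zero =>
    intro lims act nd M osuf vsuf actual budget given _ hf
    omega
  | succ f ihf =>
    intro lims act nd M osuf vsuf actual budget given hInv hf
    obtain ⟨h1, h2, h3, h4, h5, h6, h7, h8, h9, h10, h11, h12⟩ := hInv
    by_cases hnd : nd = []
    · have hos : osuf = [] := by subst hnd; exact h7.symm.eq_nil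
      subst hnd; subst hos
      have hx := pvExit limits0 lims act [] M [] vsuf actual budget given
        ⟨h1, h2, h3, h4, h5, h6, h7, h8, h9, h10, h11, h12⟩
      simpa [pvLoopA, pvLoopB] using hx
    · have hosne : osuf ≠ [] := by intro hh; exact hnd ((hh ▸ h7).eq_nil)
      have hndE : nd.isEmpty = false := by simp [hnd]
      have hosE : osuf.isEmpty = false := by simp [hosne]
      have hlenpos : 0 < nd.length := List.length_pos_of_ne_nil hnd
      have hBpart : PySem.Int.floordiv budget ↑osuf.length = PySem.Int.floordiv M ↑nd.length := by
        rw [← h4, h7.length_eq]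
      by_cases hp : PySem.Int.floordiv M ↑nd.length = 0
      · have hx := pvExit limits0 lims act nd M osuf vsuf actual budget given
          ⟨h1, h2, h3, h4, h5, h6, h7, h8, h9, h10, h11, h12⟩
        simp only [pvLoopA, pvLoopB, hndE, hosE, Bool.false_eq_true, if_false, hBpart, hp,
          if_pos]
        exact hx
      · obtain ⟨lims', act', M', rm, os', vs', actual', budget',
          hAeq, hBeq, hInv', hMeq, hrm0, hrm1⟩ :=
          pvStep limits0 lims act nd M osuf vsuf actual budget given
            ⟨h1, h2, h3, h4, h5, h6, h7, h8, h9, h10, h11, h12⟩ hnd _ rfl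
        have hstepA : pvLoopA (f + 1) lims act nd M =
            pvLoopA f lims' act' (PySem.Set.diff nd rm) M' := by
          simp only [pvLoopA, hndE, Bool.false_eq_true, if_false, hp, hAeq]
        have hstepB : pvLoopB (f + 1) osuf vsuf actual budget given =
            pvLoopB f os' vs' actual'
              (budget' - PySem.Int.floordiv M ↑nd.length * ↑os'.length)
              (given + PySem.Int.floordiv M ↑nd.length) := by
          simp only [pvLoopB, hosE, Bool.false_eq_true, if_false, hBpart, hp, hBeq]
        rw [hstepA, hstepB]
        by_cases hrm : rm = []
        · obtain ⟨hdiff, hos', hMM⟩ := hrm0 hrm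
          obtain ⟨f', rfl⟩ : ∃ f', f = f' + 1 := ⟨f - 1, by omega⟩
          have hz : PySem.Int.floordiv M' ↑(PySem.Set.diff nd rm).length = 0 := by
            rw [hdiff, hMM]
            exact pvPartZero M nd.length hlenpos
          have hndE2 : (PySem.Set.diff nd rm).isEmpty = false := by
            rw [hdiff]; simp [hnd]
          have hstepA2 : pvLoopA (f' + 1) lims' act' (PySem.Set.diff nd rm) M' = act' := by
            simp only [pvLoopA, hndE2, Bool.false_eq_true, if_false, hz, if_pos]
          obtain ⟨h1', h2', h3', h4', h5', h6', h7', h8', h9', h10', h11', h12'⟩ := hInv'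
          have hosE2 : os'.isEmpty = false := by rw [hos']; simp [hosne]
          have hzB : PySem.Int.floordiv
              (budget' - PySem.Int.floordiv M ↑nd.length * ↑os'.length) ↑os'.length = 0 := by
            rw [← hMeq, hos', ← h7.length_eq]
            rw [hdiff] at hz
            exact hz
          have hstepB2 : pvLoopB (f' + 1) os' vs' actual'
              (budget' - PySem.Int.floordiv M ↑nd.length * ↑os'.length)
              (given + PySem.Int.floordiv M ↑nd.length) =
              (actual', os', given + PySem.Int.floordiv M ↑nd.length) := by
            simp only [pvLoopB, hosE2, Bool.false_eq_true, if_false, hzB, if_pos]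
          rw [hstepA2, hstepB2]
          exact pvExit limits0 lims' act' (PySem.Set.diff nd rm) M' os' vs' actual' _ _
            ⟨h1', h2', h3', h4', h5', h6', h7', h8', h9', h10', h11', h12'⟩
        · exact ihf lims' act' (PySem.Set.diff nd rm) M' os' vs' actual' _ _ hInv'
            (by have := hrm1 hrm; omega)

-- ===== VERDICT (by name: the statement is the Claim_ definition above) =====
theorem find_initial_query_limits_py_spec : Claim_equal_find_initial_query_limits_py := by
  intro limits max_limit _
  show find_initial_query_limits_py limits max_limit = find_initial_query_limits_py_alt limits max_limit
  rw [find_initial_query_limits_py, find_initial_query_limits_py_alt]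
  rw [PySem.Set.ofList_eq_self_of_nodup _ (PySem.List.nodup_pyRange_one _ _)]
  have hlen : (PySem.List.pyRange 0 (limits.length : Int) 1).length = limits.length := by
    rw [PySem.List.length_pyRange_one]; omega
  have hmain := pvMain limits (limits.length + 2) limits (List.replicate limits.length 0)
    (PySem.List.pyRange 0 (limits.length : Int) 1) max_limit
    (PySem.List.sorted (PySem.List.pyRange 0 (limits.length : Int) 1)
      (fun i => PySem.List.pyGetD limits i 0) false)
    ((PySem.List.sorted (PySem.List.pyRange 0 (limits.length : Int) 1)
      (fun i => PySem.List.pyGetD limits i 0) false).map (fun i => PySem.List.pyGetD limits i 0))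
    (List.replicate limits.length 0) max_limit 0
    ⟨rfl, List.length_replicate, List.length_replicate, rfl,
      PySem.List.nodup_pyRange_one _ _,
      (by intro i hi; have := PySem.List.mem_pyRange_one.mp hi; omega),
      (PySem.List.sorted_perm _ _ _).symm, rfl,
      PySem.List.sorted_map_key_pairwise _ _,
      (by intro i _; omega),
      (by
        intro t ht
        rw [List.getD_replicate 0 ht, if_pos (PySem.List.mem_pyRange_one.mpr (by omega))]),
      (by
        intro t ht
        rw [List.getD_replicate 0 ht, if_pos (PySem.List.mem_pyRange_one.mpr (by omega))])⟩
    (by omega)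
  exact hmain
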